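-- pv_equiv track=rewrite | github.com/barrard/pyStocks | data_process.py | consecutiveUp
-- ===== SOURCE A (Python) =====
-- def consecutiveUp(days):
--     count = 0
--     for n in days:
--
--         if n > 0:
--             count = count+1
--         else:
--             count = 0
--     return count
-- ===== SOURCE B (Python) =====
-- def consecutiveUp(days):
--     lst = list(days)
--     count = 0
--     for n in reversed(lst):
--         if n > 0:
--             count += 1
--         else:
--             break
--     return count
-- ===== Notes on version B (the rewrite author's own statement) =====
-- stated objective: alternative
-- what changed: B scans the list backwards and counts positives until the first non-positive value, breaking early, instead of A's full forward scan that resets a counter on each non-positive value.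
import Mathlib
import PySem

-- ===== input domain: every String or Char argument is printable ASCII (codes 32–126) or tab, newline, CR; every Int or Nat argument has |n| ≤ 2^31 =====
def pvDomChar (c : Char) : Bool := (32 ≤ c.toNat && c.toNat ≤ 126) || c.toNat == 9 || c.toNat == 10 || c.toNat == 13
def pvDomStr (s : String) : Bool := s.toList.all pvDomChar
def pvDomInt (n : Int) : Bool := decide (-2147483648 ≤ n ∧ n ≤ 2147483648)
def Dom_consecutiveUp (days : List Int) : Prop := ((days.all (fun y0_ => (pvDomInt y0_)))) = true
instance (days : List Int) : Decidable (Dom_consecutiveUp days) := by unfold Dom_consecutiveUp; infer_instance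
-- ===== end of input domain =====

-- B counts the trailing positive suffix by a backward scan with an early break; A does a full forward scan resetting a counter.

-- ===== PORT A =====
-- A: forward fold, counter incremented on positive, reset to 0 otherwise
def consecutiveUp (days : List Int) : Int :=
  days.foldl (fun count n => if n > 0 then count + 1 else 0) 0

-- ===== PORT B =====
-- B: scan the reversed list, counting positives until the first non-positive (break)
def consecutiveUpAltGo : List Int → Int
  | [] => 0
  | n :: t => if n > 0 then consecutiveUpAltGo t + 1 else 0

def consecutiveUp_alt (days : List Int) : Int :=
  consecutiveUpAltGo days.reverse

-- ===== PRECONDITION & SPEC =====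
def Spec_consecutiveUp (days : List Int) (out : Int) : Prop := out = consecutiveUp_alt days
instance (days : List Int) (out : Int) : Decidable (Spec_consecutiveUp days out) := by unfold Spec_consecutiveUp; infer_instance

-- ===== CLAIM (what is proved, stated in full; the proofs are below) =====
def Claim_equal_consecutiveUp : Prop := ∀ (days : List Int), Dom_consecutiveUp days → Spec_consecutiveUp days (consecutiveUp days)

-- ===== LEMMAS AND PROOFS =====

-- All-positive lists have trailing count = length.
theorem consecutiveUpAltGo_all_pos (l : List Int) (h : ∀ x ∈ l, 0 < x) :
    consecutiveUpAltGo l = l.length := by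
  induction l with
  | nil => simp [consecutiveUpAltGo]
  | cons a t ih =>
    have ha : 0 < a := h a (by simp)
    have ht := ih fun x hx => h x (by simp [hx])
    simp [consecutiveUpAltGo, ha, ht]

-- Invariant: the forward fold from any start value c equals c + length if all
-- elements are positive, and otherwise equals the backward trailing count.
theorem consecutiveUp_foldl_char (l : List Int) : ∀ c : Int,
    l.foldl (fun count n => if n > 0 then count + 1 else 0) c =
      if ∀ x ∈ l, 0 < x then c + l.length else consecutiveUpAltGo l.reverse := by
  induction l using List.reverseRecOn with
  | nil => intro c; simp
  | append_singleton l n ih =>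
    intro c
    rw [List.foldl_append, ih c]
    simp only [List.foldl_cons, List.foldl_nil, List.reverse_append,
      List.reverse_cons, List.reverse_nil, List.nil_append, List.cons_append]
    by_cases hn : 0 < n
    · by_cases hl : ∀ x ∈ l, 0 < x
      · have hall : ∀ x ∈ l ++ [n], 0 < x := by
          intro x hx; rcases List.mem_append.mp hx with h | h
          · exact hl x h
          · simp at h; omega
        rw [if_pos hl, if_pos hall, if_pos hn]
        simp; ring
      · have hnall : ¬ ∀ x ∈ l ++ [n], 0 < x := by
          intro h; exact hl fun x hx => h x (List.mem_append.mpr (Or.inl hx))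
        rw [if_neg hl, if_neg hnall, if_pos hn]
        simp [consecutiveUpAltGo, hn]
    · have hnall : ¬ ∀ x ∈ l ++ [n], 0 < x := by
        intro h; exact hn (h n (by simp))
      rw [if_neg hnall, if_neg hn]
      simp [consecutiveUpAltGo, hn]

-- ===== VERDICT (by name: the statement is the Claim_ definition above) =====
theorem consecutiveUp_spec : Claim_equal_consecutiveUp := by
  intro days _
  unfold Spec_consecutiveUp consecutiveUp consecutiveUp_alt
  rw [consecutiveUp_foldl_char]
  by_cases h : ∀ x ∈ days, 0 < x
  · rw [if_pos h, consecutiveUpAltGo_all_pos days.reverse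
      (fun x hx => h x (List.mem_reverse.mp hx))]
    simp
  · rw [if_neg h]
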